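-- pv_equiv track=rewrite | github.com/nicsuzor/academicOps | hooks/router.py | merge_permission_decisions
-- ===== SOURCE A (Python) =====
-- def merge_permission_decisions(decisions: list[str]) -> str | None:
--     """
--     Merge permission decisions with precedence: deny > ask > allow.
--
--     Args:
--         decisions: List of permission decisions
--
--     Returns:
--         Merged decision, or None if no decisions
--     """
--     if not decisions:
--         return None
--
--     # Precedence order (highest first)
--     precedence = {"deny": 0, "ask": 1, "allow": 2}
--
--     # Find the most restrictive (lowest precedence number)
--     best = None
--     best_rank = float("inf")
--
--     for decision in decisions:
--         rank = precedence.get(decision, 3)  # Unknown decisions ranked lowest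
--         if rank < best_rank:
--             best_rank = rank
--             best = decision
--
--     return best
-- ===== SOURCE B (Python) =====
-- def merge_permission_decisions(decisions):
--     if not decisions:
--         return None
--     for level in ("deny", "ask", "allow"):
--         if level in decisions:
--             return level
--     return decisions[0]
-- ===== Notes on version B (the rewrite author's own statement) =====
-- stated objective: idiomatic
-- what changed: B probes the list for each precedence level in order of restrictiveness and returns the first one present, falling back to the first element when no known level appears, instead of A's single scan tracking a minimal numeric rank.
import Mathlib
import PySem

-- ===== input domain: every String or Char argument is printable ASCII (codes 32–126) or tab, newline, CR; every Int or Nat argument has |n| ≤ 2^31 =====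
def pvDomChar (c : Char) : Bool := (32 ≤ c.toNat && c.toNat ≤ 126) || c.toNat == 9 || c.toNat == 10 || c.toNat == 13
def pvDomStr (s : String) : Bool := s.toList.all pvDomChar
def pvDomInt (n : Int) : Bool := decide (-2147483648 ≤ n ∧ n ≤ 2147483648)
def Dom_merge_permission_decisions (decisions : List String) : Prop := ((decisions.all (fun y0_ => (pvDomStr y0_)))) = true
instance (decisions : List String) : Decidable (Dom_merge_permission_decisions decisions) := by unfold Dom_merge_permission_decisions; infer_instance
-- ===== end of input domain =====

-- B checks the precedence levels in order and returns the first present, instead of A's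
-- min-rank tracking scan; same behaviour, more idiomatic (objective: idiomatic, not faster).

-- ===== PORT A =====
-- precedence.get(decision, 3) on the literal dict {"deny":0,"ask":1,"allow":2}: exact as an if-chain
def pvRank (d : String) : Nat :=
  if d = "deny" then 0 else if d = "ask" then 1 else if d = "allow" then 2 else 3
-- loop body: if rank < best_rank then update (best, best_rank).
-- best_rank starts at float("inf"); ported as 4, exact since every rank is ≤ 3 < 4.
def pvStep (acc : Option String × Nat) (d : String) : Option String × Nat :=
  if pvRank d < acc.2 then (some d, pvRank d) else acc

def merge_permission_decisions (decisions : List String) : Option String :=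
  if decisions = [] then none
  else (decisions.foldl pvStep (none, 4)).1

-- ===== PORT B =====
def merge_permission_decisions_alt (decisions : List String) : Option String :=
  if decisions = [] then none
  else
    match ["deny", "ask", "allow"].find? (fun level => decisions.contains level) with
    | some level => some level
    | none => decisions.head?   -- decisions[0]; the list is nonempty here

-- ===== PRECONDITION & SPEC =====
def Spec_merge_permission_decisions (decisions : List String) (out : Option String) : Prop := out = merge_permission_decisions_alt decisions
instance (decisions : List String) (out : Option String) : Decidable (Spec_merge_permission_decisions decisions out) := by unfold Spec_merge_permission_decisions; infer_instance

-- ===== CLAIM (what is proved, stated in full; the proofs are below) =====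
def Claim_equal_merge_permission_decisions : Prop := ∀ (decisions : List String), Dom_merge_permission_decisions decisions → Spec_merge_permission_decisions decisions (merge_permission_decisions decisions)

-- ===== LEMMAS AND PROOFS =====

-- Characterisation of A's min-tracking fold for an arbitrary accumulator.
theorem pvFold_spec (l : List String) (b : Option String) (r : Nat) :
    (l.foldl pvStep (b, r)).1 =
      if 0 < r ∧ l.contains "deny" then some "deny"
      else if 1 < r ∧ l.contains "ask" then some "ask"
      else if 2 < r ∧ l.contains "allow" then some "allow"
      else if 3 < r then (match l.head? with | some d => some d | none => b)
      else b := by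
  induction l generalizing b r with
  | nil => simp
  | cons d t ih =>
    rw [List.foldl_cons]
    by_cases h0 : d = "deny"
    · subst h0
      have hstep : pvStep (b, r) "deny" = if 0 < r then (some "deny", 0) else (b, r) := by
        simp [pvStep, pvRank]
      rw [hstep]
      by_cases hr : 0 < r
      · rw [if_pos hr, ih]
        simp [hr]
      · rw [if_neg hr, ih]
        have : r = 0 := by omega
        subst this
        simp
    · by_cases h1 : d = "ask"
      · subst h1
        have hstep : pvStep (b, r) "ask" = if 1 < r then (some "ask", 1) else (b, r) := by
          simp [pvStep, pvRank]
        rw [hstep]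
        by_cases hr : 1 < r
        · rw [if_pos hr, ih]
          simp only [List.contains_cons, List.head?_cons]
          clear ih; split_ifs <;> simp_all <;> omega
        · rw [if_neg hr, ih]
          simp only [List.contains_cons, List.head?_cons]
          clear ih; split_ifs <;> simp_all <;> omega
      · by_cases h2 : d = "allow"
        · subst h2
          have hstep : pvStep (b, r) "allow" = if 2 < r then (some "allow", 2) else (b, r) := by
            simp [pvStep, pvRank]
          rw [hstep]
          by_cases hr : 2 < r
          · rw [if_pos hr, ih]
            simp only [List.contains_cons, List.head?_cons]
            clear ih; split_ifs <;> simp_all <;> omega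
          · rw [if_neg hr, ih]
            simp only [List.contains_cons, List.head?_cons]
            clear ih; split_ifs <;> simp_all <;> omega
        · -- unknown decision, rank 3
          have hstep : pvStep (b, r) d = if 3 < r then (some d, 3) else (b, r) := by
            simp [pvStep, pvRank, h0, h1, h2]
          rw [hstep]
          have hd : (d == "deny") = false := by simpa using h0
          have ha : (d == "ask") = false := by simpa using h1
          have hl : (d == "allow") = false := by simpa using h2
          by_cases hr : 3 < r
          · rw [if_pos hr, ih]
            simp only [List.contains_cons, List.head?_cons]
            clear ih; split_ifs <;> simp_all <;> omega
          · rw [if_neg hr, ih]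
            simp only [List.contains_cons, List.head?_cons]
            clear ih; split_ifs <;> simp_all <;> omega

-- ===== VERDICT (by name: the statement is the Claim_ definition above) =====
theorem merge_permission_decisions_spec : Claim_equal_merge_permission_decisions := by
  intro decisions _
  unfold Spec_merge_permission_decisions merge_permission_decisions merge_permission_decisions_alt
  by_cases h : decisions = []
  · simp [h]
  · rw [if_neg h, if_neg h, pvFold_spec]
    simp only [List.find?]
    cases hd : decisions.contains "deny" <;>
    cases ha : decisions.contains "ask" <;>
    cases hl : decisions.contains "allow" <;>
      simp_all <;>
      (cases decisions with
       | nil => simp_all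
       | cons x t => simp)
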